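-- pv_equiv track=rewrite | github.com/xzhuah/codingDimension | xinyu/python/node/screenControlNode/blender_scheduler.py | find_gaps_in_list
-- ===== SOURCE A (Python) =====
-- def find_gaps_in_list(index_list):
--     result = []
--     if len(index_list) <= 1:
--         return result
--
--     next_gap_start = 0
--     found_gap = False
--     for i in range(len(index_list) - 1):
--         if not found_gap:
--             if index_list[i] + 1 < index_list[i + 1]:
--                 next_gap_start = index_list[i] + 1
--                 found_gap = True
--         else:
--             result.append([next_gap_start, index_list[i] - 1])
--             next_gap_start = 0
--             found_gap = False
--     if found_gap:
--         result.append([next_gap_start, index_list[-1] - 1])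
--     return result
-- ===== SOURCE B (Python) =====
-- def find_gaps_in_list(index_list):
--     result = []
--     i = 0
--     while i < len(index_list) - 1:
--         if index_list[i] + 1 < index_list[i + 1]:
--             result.append([index_list[i] + 1, index_list[i + 1] - 1])
--             i += 2
--         else:
--             i += 1
--     return result
-- ===== Notes on version B (the rewrite author's own statement) =====
-- stated objective: simpler
-- what changed: Replaces the found_gap/next_gap_start boolean state machine (with its post-loop flush using index_list[-1]) by a single while loop over an explicit index that emits each gap pair immediately and jumps the index by 2, reproducing the original's skip of the pair after each recorded gap.
import Mathlib
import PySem

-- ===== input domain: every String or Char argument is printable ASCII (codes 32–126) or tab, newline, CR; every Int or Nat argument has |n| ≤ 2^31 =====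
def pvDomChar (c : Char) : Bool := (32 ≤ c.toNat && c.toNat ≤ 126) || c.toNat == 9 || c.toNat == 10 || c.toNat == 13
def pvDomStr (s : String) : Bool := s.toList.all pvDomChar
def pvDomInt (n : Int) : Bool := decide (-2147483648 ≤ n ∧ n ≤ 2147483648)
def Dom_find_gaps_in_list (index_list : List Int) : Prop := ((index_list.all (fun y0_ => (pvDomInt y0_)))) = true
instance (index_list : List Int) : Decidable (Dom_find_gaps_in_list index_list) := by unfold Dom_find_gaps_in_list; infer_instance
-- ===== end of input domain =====

-- B replaces A's found_gap/next_gap_start state machine (with post-loop flush via index_list[-1])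
-- by one while loop over an explicit index that emits each gap at once and jumps by 2 (simpler).

-- ===== PORT A =====
-- the 'for i in range(len(index_list) - 1)' loop of A, with its state (result, next_gap_start, found_gap);
-- the trailing 'if found_gap' flush is the else-branch of 'i < n'
def pvLoopA (xs : List Int) (n i : Nat) (result : List (List Int))
    (next_gap_start : Int) (found_gap : Bool) : List (List Int) :=
  if i < n then
    if found_gap = false then
      if PySem.List.pyGetD xs (i : Int) 0 + 1 < PySem.List.pyGetD xs ((i : Int) + 1) 0 then
        pvLoopA xs n (i + 1) result (PySem.List.pyGetD xs (i : Int) 0 + 1) true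
      else
        pvLoopA xs n (i + 1) result next_gap_start false
    else
      pvLoopA xs n (i + 1) (result ++ [[next_gap_start, PySem.List.pyGetD xs (i : Int) 0 - 1]]) 0 false
  else
    if found_gap = true then
      result ++ [[next_gap_start, PySem.List.pyGetD xs (-1) 0 - 1]]
    else
      result
termination_by n - i
decreasing_by all_goals omega

def find_gaps_in_list (index_list : List Int) : List (List Int) :=
  if index_list.length ≤ 1 then []
  else pvLoopA index_list (index_list.length - 1) 0 [] 0 false

-- ===== PORT B =====
-- B's 'while i < len(index_list) - 1' loop; appending to result becomes cons in front of the recursion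
def pvLoopB (xs : List Int) (i : Nat) : List (List Int) :=
  if i < xs.length - 1 then
    if PySem.List.pyGetD xs (i : Int) 0 + 1 < PySem.List.pyGetD xs ((i : Int) + 1) 0 then
      [PySem.List.pyGetD xs (i : Int) 0 + 1, PySem.List.pyGetD xs ((i : Int) + 1) 0 - 1] :: pvLoopB xs (i + 2)
    else
      pvLoopB xs (i + 1)
  else []
termination_by xs.length - 1 - i
decreasing_by all_goals omega

def find_gaps_in_list_alt (index_list : List Int) : List (List Int) :=
  pvLoopB index_list 0

-- ===== PRECONDITION & SPEC =====
def Spec_find_gaps_in_list (index_list : List Int) (out : List (List Int)) : Prop := out = find_gaps_in_list_alt index_list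
instance (index_list : List Int) (out : List (List Int)) : Decidable (Spec_find_gaps_in_list index_list out) := by unfold Spec_find_gaps_in_list; infer_instance

-- ===== CLAIM (what is proved, stated in full; the proofs are below) =====
def Claim_equal_find_gaps_in_list : Prop := ∀ (index_list : List Int), Dom_find_gaps_in_list index_list → Spec_find_gaps_in_list index_list (find_gaps_in_list index_list)

-- ===== LEMMAS AND PROOFS =====

-- xs[-1] = xs[len-1] once the list is nonempty
lemma pyGetD_neg_one_eq_last (xs : List Int) (h : 1 ≤ xs.length) :
    PySem.List.pyGetD xs (-1) 0 = PySem.List.pyGetD xs ((xs.length - 1 : Nat) : Int) 0 := by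
  rw [PySem.List.pyGetD_neg_ofNat xs 1 0 (by omega) (by omega), PySem.List.pyGetD_natCast]
  rw [List.getD_eq_getElem?_getD, List.getElem?_eq_getElem (by omega)]
  rfl

-- Main invariant: from position i, A's loop (over n = len-1) with its current flag/start
-- produces exactly res ++ (the pending gap, if any) ++ B's loop from the right position.
lemma loopA_eq_loopB (xs : List Int) (h1 : 1 ≤ xs.length) :
    ∀ (k i : Nat) (res : List (List Int)) (s : Int) (fg : Bool),
    xs.length - 1 - i ≤ k → i ≤ xs.length - 1 →
    pvLoopA xs (xs.length - 1) i res s fg =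
      res ++ (if fg then [s, PySem.List.pyGetD xs (i : Int) 0 - 1] :: pvLoopB xs (i + 1)
              else pvLoopB xs i) := by
  intro k
  induction k with
  | zero =>
    intro i res s fg hk hi
    have hin : i = xs.length - 1 := by omega
    have hB : pvLoopB xs i = [] := by rw [pvLoopB]; simp [hin]
    have hB1 : pvLoopB xs (i + 1) = [] := by rw [pvLoopB]; simp; omega
    cases fg with
    | false => rw [pvLoopA, hB]; simp [show ¬ i < xs.length - 1 by omega]
    | true =>
      rw [pvLoopA, hB1, pyGetD_neg_one_eq_last xs h1, ← hin]
      simp [show ¬ i < xs.length - 1 by omega]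
  | succ k ih =>
    intro i res s fg hk hi
    by_cases hlt : i < xs.length - 1
    · cases fg with
      | false =>
        by_cases hgap : PySem.List.pyGetD xs (i : Int) 0 + 1 < PySem.List.pyGetD xs ((i : Int) + 1) 0
        · have eA : pvLoopA xs (xs.length - 1) i res s false =
              pvLoopA xs (xs.length - 1) (i + 1) res (PySem.List.pyGetD xs (i : Int) 0 + 1) true := by
            rw [pvLoopA]
            simp only [if_pos hlt, if_pos (rfl : (false : Bool) = false)]
            rw [if_pos hgap]; simp
          have eB : pvLoopB xs i =
              [PySem.List.pyGetD xs (i : Int) 0 + 1, PySem.List.pyGetD xs ((i : Int) + 1) 0 - 1] ::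
                pvLoopB xs (i + 2) := by
            rw [pvLoopB]
            simp only [if_pos hlt]
            rw [if_pos hgap]
          rw [eA, ih (i + 1) res _ true (by omega) (by omega), eB]
          have hc : (((i + 1 : Nat)) : Int) = (i : Int) + 1 := by push_cast; ring
          simp [hc]
        · have eA : pvLoopA xs (xs.length - 1) i res s false =
              pvLoopA xs (xs.length - 1) (i + 1) res s false := by
            rw [pvLoopA]
            simp only [if_pos hlt, if_pos (rfl : (false : Bool) = false)]
            rw [if_neg hgap]; simp
          have eB : pvLoopB xs i = pvLoopB xs (i + 1) := by
            rw [pvLoopB]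
            simp only [if_pos hlt]
            rw [if_neg hgap]
          rw [eA, ih (i + 1) res s false (by omega) (by omega), eB]
          simp
      | true =>
        have eA : pvLoopA xs (xs.length - 1) i res s true =
            pvLoopA xs (xs.length - 1) (i + 1)
              (res ++ [[s, PySem.List.pyGetD xs (i : Int) 0 - 1]]) 0 false := by
          rw [pvLoopA]
          simp [hlt]
        rw [eA, ih (i + 1) _ 0 false (by omega) (by omega)]
        simp
    · have hin : i = xs.length - 1 := by omega
      have hB : pvLoopB xs i = [] := by rw [pvLoopB]; simp [hin]
      have hB1 : pvLoopB xs (i + 1) = [] := by rw [pvLoopB]; simp; omega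
      cases fg with
      | false => rw [pvLoopA, hB]; simp [show ¬ i < xs.length - 1 by omega]
      | true =>
        rw [pvLoopA, hB1, pyGetD_neg_one_eq_last xs h1, ← hin]
        simp [show ¬ i < xs.length - 1 by omega]

-- ===== VERDICT (by name: the statement is the Claim_ definition above) =====
theorem find_gaps_in_list_spec : Claim_equal_find_gaps_in_list := by
  intro xs _
  unfold Spec_find_gaps_in_list find_gaps_in_list find_gaps_in_list_alt
  by_cases h : xs.length ≤ 1
  · rw [if_pos h, pvLoopB, if_neg (by omega)]
  · rw [if_neg h,
      loopA_eq_loopB xs (by omega) (xs.length - 1) 0 [] 0 false (by omega) (by omega)]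
    simp
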